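-- pv_equiv track=rewrite | github.com/stanfordLINQS/SQcircuit | examples/circuitClass.py | giveSimplestCycles
-- ===== SOURCE A (Python) =====
-- def giveSimplestCycles(cycles,graph):
--     # function that finds simplest cycles form all graph cycles.
--
--     simplestCycles =[];
--     for cy in cycles:
--
--         # flag to check if the cycle is simple or not
--         simple = True;
--         cyLen = len(cy);
--         # if the cycle length is equal to 3 then it is definitely simple
--         if(cyLen>3):
--             #check all the nodes in the cycle to find a link inside the loop to detect
--             # whether it is simple or not.
--             for i1 in range(cyLen):
--                 for i2 in range(cyLen):
--                     # make sure that we are not counting edges of the loop as a link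
--                     if(i1 != i2 and abs(i1-i2)>1 and abs(i1 - i2)!=cyLen-1):
--                         if ([cy[i1],cy[i2]] or [cy[i2],cy[i1]]) in graph:
--                             simple = False;
--         if(simple):
--             simplestCycles.append(cy)
--
--     return simplestCycles
-- ===== SOURCE B (Python) =====
-- def _positions(cy, x):
--     return [i for i, y in enumerate(cy) if y == x]
--
-- def _hasChord(cy, n, e):
--     if len(e) != 2:
--         return False
--     u, v = e
--     return any(p != q and abs(p - q) > 1 and abs(p - q) != n - 1
--                for p in _positions(cy, u) for q in _positions(cy, v))
--
-- def giveSimplestCycles(cycles, graph):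
--     # edge-driven: scan the graph's length-2 edges once per cycle instead of all index pairs
--     simplestCycles = []
--     for cy in cycles:
--         n = len(cy)
--         if n <= 3 or not any(_hasChord(cy, n, e) for e in graph):
--             simplestCycles.append(cy)
--     return simplestCycles
-- ===== Notes on version B (the rewrite author's own statement) =====
-- stated objective: faster
-- what changed: B replaces A's double loop over all index pairs with a graph-membership scan inside (O(n^2*E) per cycle) by a single edge-driven pass: for each length-2 edge it looks up the endpoints' positions in the cycle and tests the same non-adjacency condition (O(E*n) per cycle).
import Mathlib
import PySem

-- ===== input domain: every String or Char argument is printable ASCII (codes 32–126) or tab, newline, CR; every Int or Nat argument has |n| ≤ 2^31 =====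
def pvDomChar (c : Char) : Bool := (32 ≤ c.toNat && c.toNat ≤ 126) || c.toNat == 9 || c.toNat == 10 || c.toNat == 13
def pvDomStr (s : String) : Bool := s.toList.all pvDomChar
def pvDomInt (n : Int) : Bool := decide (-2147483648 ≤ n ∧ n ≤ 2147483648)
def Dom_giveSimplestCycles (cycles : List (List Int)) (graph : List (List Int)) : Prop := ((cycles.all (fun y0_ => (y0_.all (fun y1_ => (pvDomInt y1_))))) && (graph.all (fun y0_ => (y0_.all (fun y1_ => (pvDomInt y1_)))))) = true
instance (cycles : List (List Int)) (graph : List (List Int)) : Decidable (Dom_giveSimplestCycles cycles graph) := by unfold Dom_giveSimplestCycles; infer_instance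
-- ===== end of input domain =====

-- B scans the graph's length-2 edges once per cycle (positions-of-endpoints lookup) instead of
-- A's double loop over all index pairs with a membership scan of the graph inside: faster.


-- ===== PORT A =====
-- Note: Python's `([cy[i1],cy[i2]] or [cy[i2],cy[i1]]) in graph` evaluates the `or` first; the
-- left operand is a non-empty (truthy) list, so the test is exactly `[cy[i1],cy[i2]] in graph`.
-- Indices from range(cyLen) are always in range, so pyGetD is exact here.
def giveSimplestCycles (cycles : List (List Int)) (graph : List (List Int)) : List (List Int) :=
  cycles.foldl (fun simplestCycles cy =>
    let cyLen : Int := cy.length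
    let simple : Bool :=
      if cyLen > 3 then
        (PySem.List.pyRange 0 cyLen 1).foldl (fun s1 i1 =>
          (PySem.List.pyRange 0 cyLen 1).foldl (fun s2 i2 =>
            if i1 ≠ i2 ∧ |i1 - i2| > 1 ∧ |i1 - i2| ≠ cyLen - 1 then
              if graph.contains [PySem.List.pyGetD cy i1 0, PySem.List.pyGetD cy i2 0] then
                false
              else s2
            else s2) s1) true
      else true
    if simple then simplestCycles ++ [cy] else simplestCycles) []

-- ===== PORT B =====
-- [i for i, y in enumerate(cy) if y == x]
def pvPositions (cy : List Int) (x : Int) : List Int :=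
  (PySem.List.enumerate cy 0).filterMap (fun iy => if iy.2 = x then some iy.1 else none)

def pvHasChord (cy : List Int) (n : Int) (e : List Int) : Bool :=
  match e with
  | [u, v] =>
      (pvPositions cy u).any (fun p => (pvPositions cy v).any (fun q =>
        decide (p ≠ q ∧ |p - q| > 1 ∧ |p - q| ≠ n - 1)))
  | _ => false

def giveSimplestCycles_alt (cycles : List (List Int)) (graph : List (List Int)) : List (List Int) :=
  cycles.foldl (fun simplestCycles cy =>
    let n : Int := cy.length
    if n ≤ 3 || !(graph.any (pvHasChord cy n)) then simplestCycles ++ [cy] else simplestCycles) []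

-- ===== PRECONDITION & SPEC =====
def Spec_giveSimplestCycles (cycles : List (List Int)) (graph : List (List Int)) (out : List (List Int)) : Prop := out = giveSimplestCycles_alt cycles graph
instance (cycles : List (List Int)) (graph : List (List Int)) (out : List (List Int)) : Decidable (Spec_giveSimplestCycles cycles graph out) := by unfold Spec_giveSimplestCycles; infer_instance

-- ===== CLAIM (what is proved, stated in full; the proofs are below) =====
def Claim_equal_giveSimplestCycles : Prop := ∀ (cycles : List (List Int)) (graph : List (List Int)), Dom_giveSimplestCycles cycles graph → Spec_giveSimplestCycles cycles graph (giveSimplestCycles cycles graph)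

-- ===== LEMMAS AND PROOFS =====

-- the inner test of A's double loop, as one boolean
def pvT (cy : List Int) (graph : List (List Int)) (i1 i2 : Int) : Bool :=
  decide (i1 ≠ i2 ∧ |i1 - i2| > 1 ∧ |i1 - i2| ≠ (cy.length : Int) - 1) &&
  graph.contains [PySem.List.pyGetD cy i1 0, PySem.List.pyGetD cy i2 0]

-- membership in the positions list
lemma mem_pvPositions {cy : List Int} {x p : Int} :
    p ∈ pvPositions cy x ↔ 0 ≤ p ∧ p < (cy.length : Int) ∧ PySem.List.pyGetD cy p 0 = x := by
  unfold pvPositions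
  simp only [List.mem_filterMap, PySem.List.mem_enumerate_iff]
  constructor
  · rintro ⟨iy, ⟨k, hk, heq⟩, hif⟩
    subst heq
    simp only [zero_add] at hif
    split_ifs at hif with hx
    · have hp : ((k : Int)) = p := by injection hif
      subst hp
      refine ⟨Int.natCast_nonneg k, by exact_mod_cast hk, ?_⟩
      rw [PySem.List.pyGetD_natCast]
      exact (List.getD_eq_getElem _ _ hk).trans hx
  · rintro ⟨h0, hlt, hx⟩
    have hk : p.toNat < cy.length := by omega
    refine ⟨(p, cy[p.toNat]), ⟨p.toNat, hk, by rw [zero_add, Int.toNat_of_nonneg h0]⟩, ?_⟩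
    rw [PySem.List.pyGetD_eq_getElem cy 0 h0 hlt] at hx
    simp [hx]

-- the per-cycle chord tests agree
lemma chord_eq (cy : List Int) (graph : List (List Int)) :
    ((PySem.List.pyRange 0 (cy.length : Int) 1).any (fun i1 =>
      (PySem.List.pyRange 0 (cy.length : Int) 1).any (pvT cy graph i1)))
    = graph.any (pvHasChord cy (cy.length : Int)) := by
  apply Bool.eq_iff_iff.mpr
  simp only [List.any_eq_true, PySem.List.mem_pyRange_one, pvT, Bool.and_eq_true,
    decide_eq_true_eq, List.contains_iff_mem]
  constructor
  · rintro ⟨i1, ⟨h01, hi1⟩, i2, ⟨h02, hi2⟩, hcond, hmem⟩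
    refine ⟨[PySem.List.pyGetD cy i1 0, PySem.List.pyGetD cy i2 0], hmem, ?_⟩
    unfold pvHasChord
    simp only [List.any_eq_true]
    exact ⟨i1, mem_pvPositions.mpr ⟨h01, hi1, rfl⟩,
           i2, mem_pvPositions.mpr ⟨h02, hi2, rfl⟩, by simpa using hcond⟩
  · rintro ⟨e, he, hch⟩
    match e with
    | [] => simp [pvHasChord] at hch
    | [_] => simp [pvHasChord] at hch
    | _ :: _ :: _ :: _ => simp [pvHasChord] at hch
    | [u, v] =>
      unfold pvHasChord at hch
      simp only [List.any_eq_true] at hch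
      obtain ⟨q1, hp, q2, hq, hcond⟩ := hch
      obtain ⟨hp0, hpl, hpu⟩ := mem_pvPositions.mp hp
      obtain ⟨hq0, hql, hqv⟩ := mem_pvPositions.mp hq
      refine ⟨q1, ⟨hp0, hpl⟩, q2, ⟨hq0, hql⟩, by simpa using hcond, ?_⟩
      rw [hpu, hqv]; exact he

-- A's inner loop: flag-clearing fold = "no hit in this row"
lemma inner_eq (cy : List Int) (graph : List (List Int)) (i1 : Int) (s1 : Bool) :
    (PySem.List.pyRange 0 (cy.length : Int) 1).foldl (fun s2 i2 =>
      if i1 ≠ i2 ∧ |i1 - i2| > 1 ∧ |i1 - i2| ≠ (cy.length : Int) - 1 then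
        if graph.contains [PySem.List.pyGetD cy i1 0, PySem.List.pyGetD cy i2 0] then
          false
        else s2
      else s2) s1
    = (s1 && !((PySem.List.pyRange 0 (cy.length : Int) 1).any (pvT cy graph i1))) := by
  rw [PySem.List.foldl_congr_mem _ _ (fun ok i2 => if pvT cy graph i1 i2 = true then false else ok) s1 ?_,
      PySem.List.foldl_if_false_eq]
  intro acc i2 _
  by_cases hc : i1 ≠ i2 ∧ |i1 - i2| > 1 ∧ |i1 - i2| ≠ (cy.length : Int) - 1
  · simp [pvT, hc]
  · simp [pvT, hc]

-- A's double loop computes "no chord found anywhere"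
lemma outer_eq (cy : List Int) (graph : List (List Int)) :
    (PySem.List.pyRange 0 (cy.length : Int) 1).foldl (fun s1 i1 =>
      (PySem.List.pyRange 0 (cy.length : Int) 1).foldl (fun s2 i2 =>
        if i1 ≠ i2 ∧ |i1 - i2| > 1 ∧ |i1 - i2| ≠ (cy.length : Int) - 1 then
          if graph.contains [PySem.List.pyGetD cy i1 0, PySem.List.pyGetD cy i2 0] then
            false
          else s2
        else s2) s1) true
    = !(graph.any (pvHasChord cy (cy.length : Int))) := by
  rw [PySem.List.foldl_congr_mem _ _
        (fun ok i1 => if ((PySem.List.pyRange 0 (cy.length : Int) 1).any (pvT cy graph i1)) = true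
                      then false else ok) true ?_,
      PySem.List.foldl_if_false_eq, Bool.true_and, chord_eq]
  intro s1 i1 _
  rw [inner_eq]
  cases h : (PySem.List.pyRange 0 (cy.length : Int) 1).any (pvT cy graph i1) <;> simp [h]

-- the per-cycle steps of the two folds agree
lemma step_eq (graph : List (List Int)) (acc : List (List Int)) (cy : List Int) :
    (if (if (cy.length : Int) > 3 then
          (PySem.List.pyRange 0 (cy.length : Int) 1).foldl (fun s1 i1 =>
            (PySem.List.pyRange 0 (cy.length : Int) 1).foldl (fun s2 i2 =>
              if i1 ≠ i2 ∧ |i1 - i2| > 1 ∧ |i1 - i2| ≠ (cy.length : Int) - 1 then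
                if graph.contains [PySem.List.pyGetD cy i1 0, PySem.List.pyGetD cy i2 0] then
                  false
                else s2
              else s2) s1) true
        else true)
     then acc ++ [cy] else acc)
    = (if ((cy.length : Int) ≤ 3 || !(graph.any (pvHasChord cy (cy.length : Int))))
       then acc ++ [cy] else acc) := by
  by_cases h3 : (cy.length : Int) > 3
  · rw [if_pos h3, outer_eq]
    have hn3 : ¬ ((cy.length : Int) ≤ 3) := by omega
    simp [hn3]
  · rw [if_neg h3]
    have hn3 : (cy.length : Int) ≤ 3 := by omega
    simp [hn3]

-- ===== VERDICT (by name: the statement is the Claim_ definition above) =====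
theorem giveSimplestCycles_spec : Claim_equal_giveSimplestCycles := by
  intro cycles graph _
  unfold Spec_giveSimplestCycles giveSimplestCycles giveSimplestCycles_alt
  apply PySem.List.foldl_congr_mem
  intro acc cy _
  exact step_eq graph acc cy
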